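-- pv_equiv track=rewrite | github.com/Mr-HRJ/shipany-template-markdown-blog | scripts/fetch_shipany_docs.py | wrap_bare_esm_lines
-- ===== SOURCE A (Python) =====
-- _ESM_RESERVED = ("export ", "import ", "const ", "let ", "var ", "function ")
--
-- def wrap_bare_esm_lines(body: str) -> str:
--     """Wrap bare top-of-line `export FOO=...` / `import ...` blocks in a fence.
--
--     MDX parses `export`/`import` at column 0 as ES module syntax and breaks
--     when it's really a shell snippet pasted without a code fence.
--     """
--     lines = body.split("\n")
--     out: list[str] = []
--     in_fence = False
--     i = 0
--     while i < len(lines):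
--         line = lines[i]
--         stripped = line.lstrip()
--         if stripped.startswith("```") or stripped.startswith("~~~"):
--             in_fence = not in_fence
--             out.append(line)
--             i += 1
--             continue
--         if not in_fence and any(line.startswith(k) for k in _ESM_RESERVED):
--             block = []
--             while i < len(lines) and any(lines[i].startswith(k) for k in _ESM_RESERVED):
--                 block.append(lines[i])
--                 i += 1
--             out.append("```bash")
--             out.extend(block)
--             out.append("```")
--             continue
--         out.append(line)
--         i += 1
--     return "\n".join(out)
-- ===== SOURCE B (Python) =====
-- _ESM_RESERVED = ("export ", "import ", "const ", "let ", "var ", "function ")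
--
-- def wrap_bare_esm_lines(body: str) -> str:
--     """Single flat pass with two booleans (in_fence, in_block) instead of outer+inner while."""
--     out = []
--     in_fence = False
--     in_block = False
--     for line in body.split("\n"):
--         stripped = line.lstrip()
--         if stripped.startswith("```") or stripped.startswith("~~~"):
--             if in_block:
--                 out.append("```")
--                 in_block = False
--             in_fence = not in_fence
--             out.append(line)
--         elif not in_fence and any(line.startswith(k) for k in _ESM_RESERVED):
--             if not in_block:
--                 out.append("```bash")
--                 in_block = True
--             out.append(line)
--         else:
--             if in_block:
--                 out.append("```")
--                 in_block = False
--             out.append(line)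
--     if in_block:
--         out.append("```")
--     return "\n".join(out)
-- ===== Notes on version B (the rewrite author's own statement) =====
-- stated objective: simpler
-- what changed: Replaces A's outer while with index plus inner block-collecting while by one flat for-loop over the lines maintaining two booleans (in_fence, in_block), emitting the opening/closing fences as state transitions.
import Mathlib
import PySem

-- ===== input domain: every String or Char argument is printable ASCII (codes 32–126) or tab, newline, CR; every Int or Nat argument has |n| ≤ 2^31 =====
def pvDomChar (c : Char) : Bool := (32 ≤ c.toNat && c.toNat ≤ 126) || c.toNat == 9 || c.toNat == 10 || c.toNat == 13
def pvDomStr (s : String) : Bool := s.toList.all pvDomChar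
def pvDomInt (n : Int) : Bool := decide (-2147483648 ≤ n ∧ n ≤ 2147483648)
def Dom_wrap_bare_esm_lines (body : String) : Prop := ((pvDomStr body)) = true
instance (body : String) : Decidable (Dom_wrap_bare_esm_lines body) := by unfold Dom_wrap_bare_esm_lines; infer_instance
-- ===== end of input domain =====

-- B replaces A's outer-while-plus-inner-while grouping by one flat pass keeping two booleans
-- (in_fence, in_block); objective: simpler decomposition, same O(n) cost.

-- shared predicates (the same tuple constant and tests both Pythons use)
def esmKeywords : List String := ["export ", "import ", "const ", "let ", "var ", "function "]

def isEsm (line : String) : Bool := esmKeywords.any (fun k => PySem.Str.startswith line k)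

def isFenceLine (line : String) : Bool :=
  let stripped := PySem.Str.lstrip line
  PySem.Str.startswith stripped "```" || PySem.Str.startswith stripped "~~~"

-- ===== PORT A =====
-- inner while: collect the maximal run of ESM-prefixed lines, return (block, remainder)
def innerA : List String → List String × List String
  | [] => ([], [])
  | l :: rest =>
    if isEsm l then
      let p := innerA rest
      (l :: p.1, p.2)
    else ([], l :: rest)

theorem innerA_snd_len : ∀ xs : List String, (innerA xs).2.length ≤ xs.length := by
  intro xs
  induction xs with
  | nil => simp [innerA]
  | cons l rest ih =>
    by_cases h : isEsm l = true
    · simp [innerA, h]; omega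
    · simp [innerA, h]

def loopA : List String → Bool → List String
  | [], _ => []
  | l :: rest, inFence =>
    if isFenceLine l then
      l :: loopA rest (!inFence)
    else if _h : (!inFence && isEsm l) = true then
      let p := innerA (l :: rest)
      "```bash" :: (p.1 ++ ("```" :: loopA p.2 inFence))
    else
      l :: loopA rest inFence
termination_by xs _ => xs.length
decreasing_by
  · simp
  · have he : isEsm l = true := by simp at _h; exact _h.2
    simp [innerA, he]
    have := innerA_snd_len rest
    omega
  · simp

def wrap_bare_esm_lines (body : String) : String :=
  PySem.Str.join "\n" (loopA ((PySem.Str.split? body "\n").getD []) false)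

-- ===== PORT B =====
def loopB : List String → Bool → Bool → List String
  | [], _, inBlock => if inBlock then ["```"] else []
  | l :: rest, inFence, inBlock =>
    if isFenceLine l then
      (if inBlock then ["```"] else []) ++ l :: loopB rest (!inFence) false
    else if !inFence && isEsm l then
      (if inBlock then [] else ["```bash"]) ++ l :: loopB rest inFence true
    else
      (if inBlock then ["```"] else []) ++ l :: loopB rest inFence false

def wrap_bare_esm_lines_alt (body : String) : String :=
  PySem.Str.join "\n" (loopB ((PySem.Str.split? body "\n").getD []) false false)

-- ===== PRECONDITION & SPEC =====
def Spec_wrap_bare_esm_lines (body : String) (out : String) : Prop := out = wrap_bare_esm_lines_alt body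
instance (body : String) (out : String) : Decidable (Spec_wrap_bare_esm_lines body out) := by unfold Spec_wrap_bare_esm_lines; infer_instance

-- ===== CLAIM (what is proved, stated in full; the proofs are below) =====
def Claim_equal_wrap_bare_esm_lines : Prop := ∀ (body : String), Dom_wrap_bare_esm_lines body → Spec_wrap_bare_esm_lines body (wrap_bare_esm_lines body)

-- ===== LEMMAS AND PROOFS =====

-- an ESM line starts at column 0 with a letter, hence is never a fence line
theorem fence_false_of_head (l : String) (c : Char) (t : List Char)
    (hl : l.toList = c :: t) (h1 : PySem.Chars.isspace c = false)
    (h2 : (c == '`') = false) (h3 : (c == '~') = false) : isFenceLine l = false := by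
  have hlt : (PySem.Str.lstrip l).toList = c :: t := by
    rw [PySem.Str.toList_lstrip, hl]
    simp [PySem.Chars.lstrip, List.dropWhile, h1]
  simp only [isFenceLine, PySem.Str.startswith, PySem.Chars.startswith, hlt, Bool.or_eq_false_iff]
  constructor
  · show List.isPrefixOf ['`','`','`'] (c :: t) = false
    have hc : ¬ ('`' = c) := fun heq => by rw [← heq] at h2; simp at h2
    simp [List.isPrefixOf, hc]
  · show List.isPrefixOf ['~','~','~'] (c :: t) = false
    have hc : ¬ ('~' = c) := fun heq => by rw [← heq] at h3; simp at h3
    simp [List.isPrefixOf, hc]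

theorem startswith_head (l k : String) (c : Char) (ks : List Char)
    (hk : k.toList = c :: ks) (h : PySem.Str.startswith l k = true) :
    ∃ t, l.toList = c :: t := by
  simp only [PySem.Str.startswith, PySem.Chars.startswith] at h
  rw [List.isPrefixOf_iff_prefix] at h
  obtain ⟨u, hu⟩ := h
  exact ⟨ks ++ u, by rw [← hu, hk]; simp⟩

theorem esm_not_fence (l : String) (h : isEsm l = true) : isFenceLine l = false := by
  simp only [isEsm, esmKeywords, List.any_cons, List.any_nil, Bool.or_eq_true] at h
  rcases h with h | h | h | h | h | (h | h)
  · obtain ⟨t, ht⟩ := startswith_head l "export " 'e' "xport ".toList rfl h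
    exact fence_false_of_head l 'e' t ht (by decide) (by decide) (by decide)
  · obtain ⟨t, ht⟩ := startswith_head l "import " 'i' "mport ".toList rfl h
    exact fence_false_of_head l 'i' t ht (by decide) (by decide) (by decide)
  · obtain ⟨t, ht⟩ := startswith_head l "const " 'c' "onst ".toList rfl h
    exact fence_false_of_head l 'c' t ht (by decide) (by decide) (by decide)
  · obtain ⟨t, ht⟩ := startswith_head l "let " 'l' "et ".toList rfl h
    exact fence_false_of_head l 'l' t ht (by decide) (by decide) (by decide)
  · obtain ⟨t, ht⟩ := startswith_head l "var " 'v' "ar ".toList rfl h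
    exact fence_false_of_head l 'v' t ht (by decide) (by decide) (by decide)
  · obtain ⟨t, ht⟩ := startswith_head l "function " 'f' "unction ".toList rfl h
    exact fence_false_of_head l 'f' t ht (by decide) (by decide) (by decide)
  · simp at h

-- while in_block (= B's state true, out of fence), B emits exactly A's inner-while block
-- followed by the closing fence
theorem loopB_block (xs : List String) :
    loopB xs false true = (innerA xs).1 ++ "```" :: loopB (innerA xs).2 false false := by
  induction xs with
  | nil => simp [loopB, innerA]
  | cons l rest ih =>
    by_cases he : isEsm l = true
    · have hf : isFenceLine l = false := esm_not_fence l he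
      simp [loopB, innerA, he, hf, ih]
    · by_cases hf : isFenceLine l = true
      · simp [loopB, innerA, he, hf]
      · simp [loopB, innerA, he, hf]

theorem loopA_eq_loopB : ∀ (n : Nat) (xs : List String), xs.length ≤ n →
    ∀ f, loopA xs f = loopB xs f false := by
  intro n
  induction n with
  | zero =>
    intro xs hxs f
    have : xs = [] := List.length_eq_zero_iff.mp (Nat.le_zero.mp hxs)
    subst this; simp [loopA, loopB]
  | succ n ih =>
    intro xs hxs f
    cases xs with
    | nil => simp [loopA, loopB]
    | cons l rest =>
      simp only [List.length_cons, Nat.add_le_add_iff_right] at hxs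
      by_cases hf : isFenceLine l = true
      · simp [loopA, loopB, hf, ih rest hxs]
      · by_cases he : (!f && isEsm l) = true
        · obtain ⟨hfb, hesm⟩ := Bool.and_eq_true_iff.mp he
          have hff : f = false := by cases f <;> simp_all
          subst hff
          rw [show loopA (l :: rest) false =
              "```bash" :: ((innerA (l :: rest)).1 ++
                ("```" :: loopA (innerA (l :: rest)).2 false)) by
            rw [loopA]; simp [hf, hesm]]
          have hin : innerA (l :: rest) = (l :: (innerA rest).1, (innerA rest).2) := by
            simp [innerA, hesm]
          rw [hin]
          have hr : (innerA rest).2.length ≤ n := le_trans (innerA_snd_len rest) hxs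
          simp only [loopB, hf, Bool.not_false, hesm, Bool.and_self, if_true, if_false,
            Bool.false_eq_true, List.nil_append]
          rw [loopB_block rest, ih _ hr]
          simp
        · rw [show loopA (l :: rest) f = l :: loopA rest f by rw [loopA]; simp [hf, he]]
          simp only [loopB, hf, Bool.false_eq_true, if_false, he, List.nil_append]
          rw [ih rest hxs]

-- ===== VERDICT (by name: the statement is the Claim_ definition above) =====
theorem wrap_bare_esm_lines_spec : Claim_equal_wrap_bare_esm_lines := by
  intro body _
  unfold Spec_wrap_bare_esm_lines wrap_bare_esm_lines wrap_bare_esm_lines_alt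
  rw [loopA_eq_loopB (((PySem.Str.split? body "\n").getD []).length) _ le_rfl]
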